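-- pv_equiv track=rewrite | github.com/Heshan-Sandamal/advent-of-code-2023 | dec2/puzzle-2.py | get_power
-- ===== SOURCE A (Python) =====
-- def get_power(sets):
--     min_reds = 0
--     min_blues = 0
--     min_greens = 0
--
--     for values in sets:
--         reds = values["red"]
--         blues = values["blue"]
--         greens = values["green"]
--
--         if reds > min_reds:
--             min_reds = reds
--         if greens > min_greens:
--             min_greens = greens
--         if blues > min_blues:
--             min_blues = blues
--
--     return min_reds * min_blues * min_greens
-- ===== SOURCE B (Python) =====
-- def get_power(sets):
--     power = 1
--     for color in ("red", "blue", "green"):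
--         power *= sorted([0] + [s[color] for s in sets])[-1]
--     return power
-- ===== Notes on version B (the rewrite author's own statement) =====
-- stated objective: alternative
-- what changed: Instead of A's fused single pass keeping three running maxima, B loops over the three colors and for each one sorts that color's values (seeded with a 0 sentinel) and multiplies the last (largest) element into a running product.
import Mathlib
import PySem

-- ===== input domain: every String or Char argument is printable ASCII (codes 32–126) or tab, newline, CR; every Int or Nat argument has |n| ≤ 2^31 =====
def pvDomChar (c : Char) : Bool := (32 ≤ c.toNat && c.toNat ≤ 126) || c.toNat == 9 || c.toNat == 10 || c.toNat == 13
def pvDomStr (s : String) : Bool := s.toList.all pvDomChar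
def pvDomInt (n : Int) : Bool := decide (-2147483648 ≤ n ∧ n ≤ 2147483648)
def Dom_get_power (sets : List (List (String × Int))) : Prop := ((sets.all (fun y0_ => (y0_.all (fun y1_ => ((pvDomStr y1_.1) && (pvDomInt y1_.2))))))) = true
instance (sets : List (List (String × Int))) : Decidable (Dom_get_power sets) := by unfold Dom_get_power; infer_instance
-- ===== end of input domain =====

-- B replaces A's fused running-maxima pass by a loop over the three colors that sorts each
-- color's values (seeded with a 0 sentinel) and multiplies the last element into a running product.

-- ===== PORT A =====
-- values["red"] raises KeyError when the key is missing; Pre_ excludes that, so .getD 0 is never the value used.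
def get_power (sets : List (List (String × Int))) : Int :=
  let st := sets.foldl (fun (acc : Int × Int × Int) values =>
    let reds := ((PySem.Dict.mk values).get? "red").getD 0
    let blues := ((PySem.Dict.mk values).get? "blue").getD 0
    let greens := ((PySem.Dict.mk values).get? "green").getD 0
    let min_reds := if reds > acc.1 then reds else acc.1
    let min_greens := if greens > acc.2.2 then greens else acc.2.2
    let min_blues := if blues > acc.2.1 then blues else acc.2.1
    (min_reds, min_blues, min_greens)) (0, 0, 0)
  st.1 * st.2.1 * st.2.2

-- ===== PORT B =====
-- s[color] likewise raises KeyError on a missing key (excluded by Pre_).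
-- sorted(...)[-1]: the list carries the 0 sentinel so it is never empty; the .getD 0 branch is unreachable.
def get_power_alt (sets : List (List (String × Int))) : Int :=
  (["red", "blue", "green"] : List String).foldl (fun power color =>
    power * ((PySem.List.pyGet?
      (PySem.List.sorted (0 :: sets.map (fun s => ((PySem.Dict.mk s).get? color).getD 0)) (fun y => y) false)
      (-1)).getD 0)) 1

-- ===== PRECONDITION & SPEC =====
-- Pre_ excludes exactly the inputs where Python raises KeyError: some set lacks "red", "blue" or "green".
def Pre_get_power (sets : List (List (String × Int))) : Prop :=
  (sets.all (fun v => (PySem.Dict.mk v).contains "red" && (PySem.Dict.mk v).contains "blue" && (PySem.Dict.mk v).contains "green")) = true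
instance (sets : List (List (String × Int))) : Decidable (Pre_get_power sets) := by unfold Pre_get_power; infer_instance
def pvWitness_get_power : (List (List (String × Int))) := [[("red", 4), ("blue", 2), ("green", 6)], [("red", 1), ("blue", 3), ("green", 0)]]

def Spec_get_power (sets : List (List (String × Int))) (out : Int) : Prop := out = get_power_alt sets
instance (sets : List (List (String × Int))) (out : Int) : Decidable (Spec_get_power sets out) := by unfold Spec_get_power; infer_instance

-- ===== CLAIM (what is proved, stated in full; the proofs are below) =====
def Claim_equal_get_power : Prop := ∀ (sets : List (List (String × Int))), Dom_get_power sets → Pre_get_power sets → Spec_get_power sets (get_power sets)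

-- ===== LEMMAS AND PROOFS =====

theorem if_gt_eq_max (a x : Int) : (if x > a then x else a) = max a x := by
  rw [max_def]; split_ifs <;> omega

-- the last element of a sorted (pairwise-≤) nonempty list is its running max
theorem getLast_of_pairwise (t : List Int) : ∀ (a : Int), (a :: t).Pairwise (· ≤ ·) →
    (a :: t).getLast (by simp) = t.foldl max a := by
  induction t with
  | nil => intro a _; simp
  | cons b t ih =>
    intro a hp
    have hab : a ≤ b := (List.pairwise_cons.mp hp).1 b (by simp)
    have hbt := (List.pairwise_cons.mp hp).2
    rw [List.getLast_cons (by simp), ih b hbt]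
    simp [max_eq_right hab]

-- folding max is invariant under permutation
theorem foldl_max_perm (l l' : List Int) (h : l.Perm l') (c : Int) :
    l.foldl max c = l'.foldl max c := by
  induction h generalizing c with
  | nil => rfl
  | cons x _ ih => simp only [List.foldl_cons]; exact ih _
  | swap x y l => simp only [List.foldl_cons]; rw [max_right_comm]
  | trans _ _ ih1 ih2 => rw [ih1, ih2]

-- B's per-color sort-and-take-last equals the running-max loop over that color, started at 0
theorem sortLast_eq (sets : List (List (String × Int))) (color : String) :
    ((PySem.List.pyGet?
      (PySem.List.sorted (0 :: sets.map (fun s => ((PySem.Dict.mk s).get? color).getD 0)) (fun y => y) false)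
      (-1)).getD 0)
    = sets.foldl (fun a s => max a (((PySem.Dict.mk s).get? color).getD 0)) 0 := by
  set vals := sets.map (fun s => ((PySem.Dict.mk s).get? color).getD 0) with hvals
  have hperm : (PySem.List.sorted (0 :: vals) (fun y => y) false).Perm (0 :: vals) :=
    PySem.List.sorted_perm _ _ _
  obtain ⟨a, t, hs⟩ : ∃ a t, PySem.List.sorted (0 :: vals) (fun y => y) false = a :: t := by
    cases h : PySem.List.sorted (0 :: vals) (fun y => y) false with
    | nil => exact absurd ((h ▸ hperm).symm.eq_nil) (by simp)
    | cons a t => exact ⟨a, t, rfl⟩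
  have hpw : (a :: t).Pairwise (· ≤ ·) := by
    have := PySem.List.sorted_pairwise (xs := 0 :: vals) (key := fun y => y)
    rw [hs] at this; exact this
  have ha0 : a ≤ 0 := by
    have := PySem.List.key_head_sorted_le (xs := 0 :: vals) (key := fun y => y) hs 0 (by simp)
    simpa using this
  rw [hs]
  have hlast : PySem.List.pyGet? (a :: t) (-1) = some ((a :: t).getLast (by simp)) := by
    simp [PySem.List.pyGet?, PySem.List.pyIdx?, List.getLast_eq_getElem]
    omega
  rw [hlast, Option.getD_some, getLast_of_pairwise t a hpw]
  have h1 : t.foldl max a = (a :: t).foldl max a := by simp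
  rw [h1, foldl_max_perm _ _ (hs ▸ hperm) a]
  simp only [List.foldl_cons, max_comm a 0, max_eq_left ha0]
  rw [List.foldl_map]

-- A's fold computes the three running maxima componentwise.
theorem foldA_eq (sets : List (List (String × Int))) : ∀ (r b g : Int),
    sets.foldl (fun (acc : Int × Int × Int) values =>
      let reds := ((PySem.Dict.mk values).get? "red").getD 0
      let blues := ((PySem.Dict.mk values).get? "blue").getD 0
      let greens := ((PySem.Dict.mk values).get? "green").getD 0
      let min_reds := if reds > acc.1 then reds else acc.1
      let min_greens := if greens > acc.2.2 then greens else acc.2.2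
      let min_blues := if blues > acc.2.1 then blues else acc.2.1
      (min_reds, min_blues, min_greens)) (r, b, g)
      = (sets.foldl (fun a s => max a (((PySem.Dict.mk s).get? "red").getD 0)) r,
         sets.foldl (fun a s => max a (((PySem.Dict.mk s).get? "blue").getD 0)) b,
         sets.foldl (fun a s => max a (((PySem.Dict.mk s).get? "green").getD 0)) g) := by
  induction sets with
  | nil => intro r b g; simp
  | cons x t ih =>
    intro r b g
    rw [List.foldl_cons, ih]
    simp only [if_gt_eq_max, List.foldl_cons]

-- ===== VERDICT (by name: the statement is the Claim_ definition above) =====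
theorem get_power_spec : Claim_equal_get_power := by
  intro sets _ _
  unfold Spec_get_power get_power get_power_alt
  simp only [List.foldl_cons, List.foldl_nil, sortLast_eq, foldA_eq, one_mul]
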